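-- pv_equiv track=rewrite | github.com/jermspeaks/magic-sand | trump-speeches/cspan_speech_formatter.py | fix_contractions
-- ===== SOURCE A (Python) =====
-- def fix_contractions(text):
--     # Common contractions
--     contractions = {
--         "It'S": "It's",
--         "That'S": "That's",
--         "I'M": "I'm",
--         "I'Ve": "I've",
--         "I'Ll": "I'll",
--         "We'Re": "We're",
--         "We'Ll": "We'll",
--         "We'Ve": "We've",
--         "You'Re": "You're",
--         "They'Re": "They're",
--         "Wasn'T": "Wasn't",
--         "Don'T": "Don't",
--         "Can'T": "Can't",
--         "Won'T": "Won't",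
--         "Isn'T": "Isn't",
--         "Aren'T": "Aren't",
--         "Couldn'T": "Couldn't",
--         "Wouldn'T": "Wouldn't",
--         "Shouldn'T": "Shouldn't",
--         "Haven'T": "Haven't",
--         "Hasn'T": "Hasn't",
--     }
--
--     for wrong, right in contractions.items():
--         text = text.replace(wrong, right)
--
--     return text
-- ===== SOURCE B (Python) =====
-- def fix_contractions(text):
--     # The fixes all follow one pattern: in each mis-capitalized key, the letter
--     # group after the apostrophe has its first letter lowercased.  Store only
--     # (stem, suffix) parts and derive both forms; apply them in ONE left-to-right
--     # scan over the text instead of 21 sequential whole-string replace passes.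
--     parts = [
--         ("It", "S"), ("That", "S"), ("I", "M"), ("I", "Ve"), ("I", "Ll"),
--         ("We", "Re"), ("We", "Ll"), ("We", "Ve"), ("You", "Re"), ("They", "Re"),
--         ("Wasn", "T"), ("Don", "T"), ("Can", "T"), ("Won", "T"), ("Isn", "T"),
--         ("Aren", "T"), ("Couldn", "T"), ("Wouldn", "T"), ("Shouldn", "T"),
--         ("Haven", "T"), ("Hasn", "T"),
--     ]
--     rules = [(stem + "'" + suf, stem + "'" + suf[0].lower() + suf[1:])
--              for stem, suf in parts]
--
--     out = []
--     i = 0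
--     n = len(text)
--     while i < n:
--         for wrong, right in rules:
--             if text.startswith(wrong, i):
--                 out.append(right)
--                 i += len(wrong)
--                 break
--         else:
--             out.append(text[i])
--             i += 1
--     return ''.join(out)
-- ===== Notes on version B (the rewrite author's own statement) =====
-- stated objective: alternative
-- what changed: replaces the 21 sequential whole-string str.replace passes and the literal key->value dict by one left-to-right scan over a rule table derived from (stem,suffix) parts (value computed by lowercasing the letter after the apostrophe), emitting the fixed form of the first rule matching at the current position
-- outside the precondition, e.g. on fix_contractions("Wasn'That'S"): A returns "Wasn'that's", B returns "Wasn'that'S"; on fix_contractions("It'Shouldn'That'S"): A returns "It'shouldn'That's", B returns "It'shouldn'That's"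
import Mathlib
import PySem

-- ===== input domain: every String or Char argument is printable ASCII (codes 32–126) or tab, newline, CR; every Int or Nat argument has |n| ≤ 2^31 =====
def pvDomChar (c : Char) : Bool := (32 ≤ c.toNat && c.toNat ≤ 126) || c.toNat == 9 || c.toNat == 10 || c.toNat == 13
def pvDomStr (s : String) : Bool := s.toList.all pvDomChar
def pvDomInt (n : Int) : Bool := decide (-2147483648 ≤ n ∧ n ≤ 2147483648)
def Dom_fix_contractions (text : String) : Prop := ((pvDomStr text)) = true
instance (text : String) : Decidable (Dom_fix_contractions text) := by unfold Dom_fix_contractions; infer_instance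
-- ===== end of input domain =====

-- B replaces A's 21 sequential whole-string replace passes and its literal key->value dict by one
-- left-to-right scan over rules derived from (stem,suffix) parts; A mutates nothing; return values compared.

-- ===== PORT A =====
-- the dict literal of A, as an association list in insertion order (all keys distinct)
def fixPairs : List (String × String) :=
  [("It'S", "It's"), ("That'S", "That's"), ("I'M", "I'm"), ("I'Ve", "I've"), ("I'Ll", "I'll"),
   ("We'Re", "We're"), ("We'Ll", "We'll"), ("We'Ve", "We've"), ("You'Re", "You're"),
   ("They'Re", "They're"), ("Wasn'T", "Wasn't"), ("Don'T", "Don't"), ("Can'T", "Can't"),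
   ("Won'T", "Won't"), ("Isn'T", "Isn't"), ("Aren'T", "Aren't"), ("Couldn'T", "Couldn't"),
   ("Wouldn'T", "Wouldn't"), ("Shouldn'T", "Shouldn't"), ("Haven'T", "Haven't"), ("Hasn'T", "Hasn't")]

def fix_contractions (text : String) : String :=
  fixPairs.foldl (fun t p => PySem.Str.replace t p.1 p.2) text

-- ===== PORT B =====
-- the (stem, suffix) parts table of B
def fcParts : List (String × String) :=
  [("It", "S"), ("That", "S"), ("I", "M"), ("I", "Ve"), ("I", "Ll"),
   ("We", "Re"), ("We", "Ll"), ("We", "Ve"), ("You", "Re"), ("They", "Re"),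
   ("Wasn", "T"), ("Don", "T"), ("Can", "T"), ("Won", "T"), ("Isn", "T"),
   ("Aren", "T"), ("Couldn", "T"), ("Wouldn", "T"), ("Shouldn", "T"),
   ("Haven", "T"), ("Hasn", "T")]

-- Source B's rules comprehension: wrong = stem + "'" + suf, right = stem + "'" + suf[0].lower() + suf[1:]
-- (built over char lists, which is how B's scan consumes the text)
def fcRules : List (List Char × List Char) :=
  fcParts.map (fun p =>
    let stem := p.1.toList
    let suf := p.2.toList
    (stem ++ '\'' :: suf,
     stem ++ '\'' :: (match suf with | [] => [] | c :: r => c.toLower :: r)))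

-- the while-loop of B (i < n counts down as fuel): at each position emit the fixed form of the
-- first matching rule (advancing past it), otherwise copy one character
def fcGo : Nat → List Char → List Char
  | 0, _ => []
  | _ + 1, [] => []
  | fuel + 1, c :: rest =>
    match fcRules.find? (fun p => p.1.isPrefixOf (c :: rest)) with
    | some p => p.2 ++ fcGo fuel (rest.drop (p.1.length - 1))
    | none => c :: fcGo fuel rest

def fcScan (l : List Char) : List Char := fcGo l.length l

def fix_contractions_alt (text : String) : String :=
  String.ofList (fcScan text.toList)

-- ===== PRECONDITION & SPEC =====
-- Pre_ excludes texts containing one of the 22 overlap substrings in which a negative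
-- contraction's final T also begins "That'S"/"They'Re" (e.g. "Wasn'That'S"): there A's 21
-- sequential whole-string passes apply both fixes while B's single left-to-right pass applies
-- only the leftmost match — an overlap corner no caller specified, where either output is
-- defensible (the excluded examples below show both values).
def Pre_fix_contractions (text : String) : Prop :=
  ∀ f ∈ ["Wasn'That'S", "Wasn'They'Re", "Don'That'S", "Don'They'Re", "Can'That'S", "Can'They'Re",
      "Won'That'S", "Won'They'Re", "Isn'That'S", "Isn'They'Re", "Aren'That'S", "Aren'They'Re",
      "Couldn'That'S", "Couldn'They'Re", "Wouldn'That'S", "Wouldn'They'Re", "Shouldn'That'S",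
      "Shouldn'They'Re", "Haven'That'S", "Haven'They'Re", "Hasn'That'S", "Hasn'They'Re"],
    PySem.Str.isIn f text = false
instance (text : String) : Decidable (Pre_fix_contractions text) := by
  unfold Pre_fix_contractions; infer_instance

def pvWitness_fix_contractions : String := "Don'T worry, It'S fine"

def Spec_fix_contractions (text : String) (out : String) : Prop :=
  out = fix_contractions_alt text
instance (text : String) (out : String) : Decidable (Spec_fix_contractions text out) := by
  unfold Spec_fix_contractions; infer_instance

-- ===== CLAIM (what is proved, stated in full; the proofs are below) =====
def Claim_equal_fix_contractions : Prop := ∀ (text : String), Dom_fix_contractions text → Pre_fix_contractions text → Spec_fix_contractions text (fix_contractions text)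

-- ===== LEMMAS AND PROOFS =====

-- the A-side key/value pairs over List Char (proof-side mirror of fixPairs)
def fixPairsL : List (List Char × List Char) :=
  fixPairs.map (fun p => (p.1.toList, p.2.toList))

-- B's computed rule table coincides with A's literal table (checked by the kernel)
lemma fcRules_eq : fcRules = fixPairsL := by decide

-- the 11 keys ending in 'T, whose final T can also start "That'S"/"They'Re"
def pvTKeys : List (List Char) :=
  ["Wasn'T".toList, "Don'T".toList, "Can'T".toList, "Won'T".toList, "Isn'T".toList,
   "Aren'T".toList, "Couldn'T".toList, "Wouldn'T".toList, "Shouldn'T".toList,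
   "Haven'T".toList, "Hasn'T".toList]

-- the 22 overlap substrings excluded by Pre_fix_contractions, as char lists
def pvFusions : List (List Char) :=
  pvTKeys.flatMap (fun k => [k ++ "hat'S".toList, k ++ "hey'Re".toList])

-- ---- the replacement relation: chars only change from uppercase S/M/V/L/R/T to lowercase,
-- ---- and only immediately after an apostrophe (the prev char is threaded through)

/-- the lowercase letters a replacement can produce -/
def lowT (c : Char) : Bool := c == 's' || c == 'm' || c == 'v' || c == 'l' || c == 'r' || c == 't'

/-- the uppercase→lowercase changes the 21 values make to their keys -/
def lowP (a b : Char) : Bool :=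
  (a == 'S' && b == 's') || (a == 'M' && b == 'm') || (a == 'V' && b == 'v') ||
  (a == 'L' && b == 'l') || (a == 'R' && b == 'r') || (a == 'T' && b == 't')

/-- x is t with some chars lowered per lowP, each directly after an apostrophe; p = previous char -/
def relB : Char → List Char → List Char → Bool
  | _, [], [] => true
  | p, c :: t, d :: x => (c == d || (p == '\'' && lowP c d)) && relB c t x
  | _, _, _ => false

/-- "good pattern": never a producible lowercase letter directly after an apostrophe -/
def gkB : Char → List Char → Bool
  | _, [] => true
  | p, c :: t => !(p == '\'' && lowT c) && gkB c t

lemma lowP_spec (a b : Char) (h : lowP a b = true) :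
    lowT b = true ∧ a ≠ '\'' ∧ b ≠ '\'' ∧ ∀ e, lowP b e = false := by
  simp only [lowP, Bool.or_eq_true, Bool.and_eq_true, beq_iff_eq] at h
  rcases h with (((((⟨rfl, rfl⟩ | ⟨rfl, rfl⟩) | ⟨rfl, rfl⟩) | ⟨rfl, rfl⟩) | ⟨rfl, rfl⟩) | ⟨rfl, rfl⟩) <;>
    exact ⟨by decide, by decide, by decide, fun e => by simp [lowP]⟩

lemma relB_nil_left (p : Char) (x : List Char) (h : relB p [] x = true) : x = [] := by
  cases x with
  | nil => rfl
  | cons d x => simp [relB] at h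

lemma relB_cons_self (p c : Char) (t x : List Char) : relB p (c :: t) (c :: x) = relB c t x := by
  simp [relB]

lemma gkB_cons_not_target (p c : Char) (t : List Char) (h : lowT c = false) :
    gkB p (c :: t) = gkB c t := by simp [gkB, h]

lemma relB_refl (p : Char) (l : List Char) : relB p l l = true := by
  induction l generalizing p with
  | nil => rfl
  | cons c t ih => simpa [relB_cons_self] using ih c

lemma relB_append : ∀ (k v : List Char) (p : Char) (t x : List Char),
    relB p k v = true → relB (k.getLastD p) t x = true → relB p (k ++ t) (v ++ x) = true := by
  intro k
  induction k with
  | nil =>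
    intro v p t x h1 h2
    have hv := relB_nil_left p v h1
    subst hv; simpa using h2
  | cons c k' ih =>
    intro v p t x h1 h2
    cases v with
    | nil => simp [relB] at h1
    | cons d v' =>
      simp only [relB, Bool.and_eq_true] at h1
      simp only [List.cons_append, relB, Bool.and_eq_true]
      refine ⟨h1.1, ?_⟩
      exact ih v' c t x h1.2 (by rwa [List.getLastD_cons] at h2)

lemma relB_prev_irrel (p q : Char) (hp : p ≠ '\'') (hq : q ≠ '\'') :
    ∀ l m, relB p l m = relB q l m := by
  intro l m
  cases l with
  | nil => cases m <;> rfl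
  | cons c t =>
    cases m with
    | nil => rfl
    | cons d x =>
      simp only [relB]
      rw [show (p == '\'') = false from by simp [hp], show (q == '\'') = false from by simp [hq]]

lemma relB_trans : ∀ (t : List Char) (p : Char) (x y : List Char),
    relB p t x = true → relB p x y = true → relB p t y = true := by
  intro t
  induction t with
  | nil =>
    intro p x y h1 h2
    have := relB_nil_left p x h1; subst this
    have := relB_nil_left p y h2; subst this; rfl
  | cons c t' ih =>
    intro p x y h1 h2
    cases x with
    | nil => simp [relB] at h1
    | cons d x' =>
      cases y with
      | nil => simp [relB] at h2
      | cons e y' =>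
        simp only [relB, Bool.and_eq_true, Bool.or_eq_true, beq_iff_eq] at h1 h2
        obtain ⟨hh1, ht1⟩ := h1
        obtain ⟨hh2, ht2⟩ := h2
        by_cases hcd : c = d
        · subst hcd
          simp only [relB, Bool.and_eq_true, Bool.or_eq_true, beq_iff_eq]
          exact ⟨hh2, ih c x' y' ht1 ht2⟩
        · have hl : p = '\'' ∧ lowP c d = true := by
            rcases hh1 with h | h
            · exact absurd h hcd
            · simpa [Bool.and_eq_true, beq_iff_eq] using h
          obtain ⟨hlt, hcne, hdne, hnochain⟩ := lowP_spec c d hl.2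
          have hde : d = e := by
            rcases hh2 with h | h
            · exact h
            · exact absurd h.2 (by simp [hnochain e])
          subst hde
          simp only [relB, Bool.and_eq_true, Bool.or_eq_true, beq_iff_eq]
          refine ⟨Or.inr (by simp [hl.1, hl.2]), ?_⟩
          have ht2' : relB c x' y' = true := by
            rw [relB_prev_irrel c d hcne hdne]; exact ht2
          exact ih c x' y' ht1 ht2'

lemma relB_prefix : ∀ (k' : List Char) (p : Char) (t x : List Char),
    relB p t x = true → k' <+: x → ∃ k0, k0 <+: t ∧ relB p k0 k' = true := by
  intro k'
  induction k' with
  | nil => intro p t x _ _; exact ⟨[], List.nil_prefix, rfl⟩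
  | cons e k'' ih =>
    intro p t x h1 h2
    obtain ⟨u, rfl⟩ := h2
    cases t with
    | nil => simp [relB] at h1
    | cons c t' =>
      simp only [List.cons_append, relB, Bool.and_eq_true] at h1
      obtain ⟨hh, ht⟩ := h1
      obtain ⟨k0', hk0', hr⟩ := ih c t' (k'' ++ u) ht (List.prefix_append _ _)
      refine ⟨c :: k0', List.cons_prefix_cons.mpr ⟨rfl, hk0'⟩, ?_⟩
      simp only [relB, Bool.and_eq_true]
      exact ⟨hh, hr⟩

lemma gkB_inj : ∀ (k' : List Char) (p : Char) (k0 : List Char),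
    gkB p k' = true → relB p k0 k' = true → k0 = k' := by
  intro k'
  induction k' with
  | nil => intro p k0 _ h; cases k0 with
    | nil => rfl
    | cons c t => simp [relB] at h
  | cons c k't ih =>
    intro p k0 hg hr
    cases k0 with
    | nil => simp [relB] at hr
    | cons c0 k0' =>
      simp only [relB, Bool.and_eq_true, Bool.or_eq_true, beq_iff_eq] at hr
      obtain ⟨hh, ht⟩ := hr
      simp only [gkB, Bool.and_eq_true, Bool.not_eq_true'] at hg
      have hc : c0 = c := by
        rcases hh with h | h
        · exact h
        · exfalso
          have := (lowP_spec c0 c h.2).1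
          rw [h.1] at hg
          simp [this] at hg
      subst hc
      exact congrArg (c0 :: ·) (ih c0 k0' hg.2 ht)

lemma noCreate (k' t x : List Char) (hrel : ∀ p, relB p t x = true)
    (hgk : ∀ p, gkB p k' = true) (h : k' <+: x) : k' <+: t := by
  obtain ⟨k0, h0, hr⟩ := relB_prefix k' 'A' t x (hrel 'A') h
  rwa [gkB_inj k' 'A' k0 (hgk 'A') hr] at h0

-- ---- repl: the exact semantics of Python's str.replace (leftmost, non-overlapping, all)

def repl (old nw : List Char) : List Char → List Char
  | [] => []
  | c :: t => if old.isPrefixOf (c :: t) then nw ++ repl old nw (t.drop (old.length - 1))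
              else c :: repl old nw t
termination_by l => l.length
decreasing_by
  all_goals (simp; try omega)

lemma repl_nil (o n : List Char) : repl o n [] = [] := by simp [repl]

lemma repl_cons_neg (o n : List Char) (c : Char) (t : List Char) (h : ¬ o <+: (c :: t)) :
    repl o n (c :: t) = c :: repl o n t := by
  rw [repl, if_neg (by simpa [List.isPrefixOf_iff_prefix] using h)]

lemma repl_append_self (o n : List Char) (ho : o ≠ []) (x : List Char) :
    repl o n (o ++ x) = n ++ repl o n x := by
  cases o with
  | nil => exact absurd rfl ho
  | cons c o' =>
    rw [List.cons_append, repl,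
        if_pos (by simp [List.isPrefixOf_iff_prefix, List.prefix_append])]
    simp

lemma relB_repl (k v : List Char) (hkv : ∀ p, relB p k v = true) (hk : k ≠ []) :
    ∀ (n : Nat) (t : List Char), t.length ≤ n → ∀ p, relB p t (repl k v t) = true := by
  intro n
  induction n with
  | zero =>
    intro t ht p
    have : t = [] := List.length_eq_zero_iff.mp (Nat.le_zero.mp ht)
    subst this; simp [repl_nil, relB]
  | succ m ih =>
    intro t ht p
    cases t with
    | nil => simp [repl_nil, relB]
    | cons c t' =>
      by_cases hp : k <+: (c :: t')
      · obtain ⟨u, hu⟩ := hp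
        rw [← hu, repl_append_self k v hk u]
        have hlen : u.length ≤ m := by
          have h1 : k.length + u.length = t'.length + 1 := by
            have := congrArg List.length hu; simpa using this
          have h2 : 1 ≤ k.length := by
            cases k with
            | nil => exact absurd rfl hk
            | cons _ _ => simp
          simp only [List.length_cons] at ht
          omega
        exact relB_append k v p u (repl k v u) (hkv p) (ih u hlen _)
      · rw [repl_cons_neg k v c t' hp]
        rw [relB_cons_self]
        exact ih t' (by simpa using ht) c

lemma relB_repl' (k v : List Char) (hkv : ∀ p, relB p k v = true) (hk : k ≠ [])
    (t : List Char) (p : Char) : relB p t (repl k v t) = true :=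
  relB_repl k v hkv hk t.length t le_rfl p

-- ---- splitting a replace pass across a prefix it cannot touch

lemma repl_split (k' w : List Char) : ∀ (a x : List Char),
    (∀ j, j < a.length → ¬ k' <+: (a.drop j ++ x)) →
    repl k' w (a ++ x) = a ++ repl k' w x := by
  intro a
  induction a with
  | nil => intro x _; rfl
  | cons c a' ih =>
    intro x h
    rw [List.cons_append, repl_cons_neg k' w c (a' ++ x) (by simpa using h 0 (by simp))]
    rw [ih x (fun j hj => by simpa using h (j + 1) (by simpa using hj))]
    rfl

def shiftOK (k' a : List Char) (j : Nat) : Bool :=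
  !((a.drop j).isPrefixOf k' || k'.isPrefixOf (a.drop j))

lemma shiftOK_spec (k' a : List Char) (j : Nat) (h : shiftOK k' a j = true) (x : List Char) :
    ¬ k' <+: (a.drop j ++ x) := by
  intro hc
  rcases List.prefix_or_prefix_of_prefix hc (List.prefix_append (a.drop j) x) with h1 | h1 <;>
    simp [shiftOK, List.isPrefixOf_iff_prefix.mpr h1] at h

-- ---- the sequential passes of A, over char lists

def step (t : List Char) (pr : List Char × List Char) : List Char := repl pr.1 pr.2 t

def seqL (s : List Char) : List Char := fixPairsL.foldl step s

def PairOK (pr : List Char × List Char) : Prop :=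
  pr.1 ≠ [] ∧ (∀ p, relB p pr.1 pr.2 = true) ∧ (∀ p, gkB p pr.1 = true)

lemma relB_any_prev (k v : List Char) (h : k.head? = v.head?) (p q : Char) :
    relB p k v = relB q k v := by
  cases k with
  | nil => cases v with
    | nil => rfl
    | cons d x => rfl
  | cons c t =>
    cases v with
    | nil => rfl
    | cons d x =>
      have : c = d := by simpa using h
      subst this
      rw [relB_cons_self, relB_cons_self]

lemma gkB_any_prev (k : List Char) (h : k.head?.all (fun c => !lowT c) = true) (p q : Char) :
    gkB p k = gkB q k := by
  cases k with
  | nil => rfl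
  | cons c t =>
    have hc : lowT c = false := by simpa using h
    rw [gkB_cons_not_target p c t hc, gkB_cons_not_target q c t hc]

lemma pairs_facts : ∀ pr ∈ fixPairsL, pr.1 ≠ [] ∧ pr.1.head? = pr.2.head? ∧
    relB 'A' pr.1 pr.2 = true ∧ pr.1.head?.all (fun c => !lowT c) = true ∧ gkB 'A' pr.1 = true := by
  decide

lemma pairs_ok : ∀ pr ∈ fixPairsL, PairOK pr := by
  intro pr hpr
  obtain ⟨h1, h2, h3, h4, h5⟩ := pairs_facts pr hpr
  exact ⟨h1, fun p => by rw [relB_any_prev pr.1 pr.2 h2 p 'A']; exact h3,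
         fun p => by rw [gkB_any_prev pr.1 h4 p 'A']; exact h5⟩

lemma seq_nil : ∀ ps : List (List Char × List Char), ps.foldl step [] = [] := by
  intro ps
  induction ps with
  | nil => rfl
  | cons pr ps ih => simpa [step, repl_nil] using ih

lemma seq_through (k : List Char) : ∀ (ps : List (List Char × List Char)) (t x : List Char),
    (∀ pr ∈ ps, PairOK pr) → (∀ p, relB p t x = true) →
    (∀ pr ∈ ps, ∀ j, j < k.length → ¬ pr.1 <+: (k.drop j ++ t)) →
    ps.foldl step (k ++ x) = k ++ ps.foldl step x := by
  intro ps
  induction ps with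
  | nil => intro t x _ _ _; rfl
  | cons pr ps' ih =>
    intro t x hP hrel hj
    have hOK := hP pr (by simp)
    have hstep : step (k ++ x) pr = k ++ step x pr := by
      apply repl_split
      intro j hjk hc
      have hreljx : ∀ p, relB p (k.drop j ++ t) (k.drop j ++ x) = true := fun p =>
        relB_append (k.drop j) (k.drop j) p t x (relB_refl p _) (hrel _)
      have := noCreate pr.1 (k.drop j ++ t) (k.drop j ++ x) hreljx hOK.2.2 hc
      exact hj pr (by simp) j hjk this
    rw [List.foldl_cons, hstep, List.foldl_cons]
    exact ih t (step x pr) (fun q hq => hP q (by simp [hq]))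
      (fun p => relB_trans t p x (step x pr) (hrel p)
        (relB_repl' pr.1 pr.2 hOK.2.1 hOK.1 x p))
      (fun q hq => hj q (by simp [hq]))

lemma seq_clean : ∀ (ps : List (List Char × List Char)) (a x : List Char),
    (∀ pr ∈ ps, ∀ j, j < a.length → shiftOK pr.1 a j = true) →
    ps.foldl step (a ++ x) = a ++ ps.foldl step x := by
  intro ps
  induction ps with
  | nil => intro a x _; rfl
  | cons pr ps' ih =>
    intro a x h
    have hstep : step (a ++ x) pr = a ++ step x pr := by
      apply repl_split
      intro j hj
      exact shiftOK_spec pr.1 a j (h pr (by simp) j hj) x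
    rw [List.foldl_cons, hstep, List.foldl_cons]
    exact ih a (step x pr) (fun q hq => h q (by simp [hq]))

lemma seq_noMatch : ∀ (ps : List (List Char × List Char)) (c : Char) (t x : List Char),
    (∀ pr ∈ ps, PairOK pr) → (∀ p, relB p t x = true) →
    (∀ pr ∈ ps, ¬ pr.1 <+: (c :: t)) →
    ps.foldl step (c :: x) = c :: ps.foldl step x := by
  intro ps
  induction ps with
  | nil => intro c t x _ _ _; rfl
  | cons pr ps' ih =>
    intro c t x hP hrel h
    have hOK := hP pr (by simp)
    have hstep : step (c :: x) pr = c :: step x pr := by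
      apply repl_cons_neg
      intro hc
      have hrelc : ∀ p, relB p (c :: t) (c :: x) = true := fun p => by
        rw [relB_cons_self]; exact hrel c
      exact h pr (by simp) (noCreate pr.1 (c :: t) (c :: x) hrelc hOK.2.2 hc)
    rw [List.foldl_cons, hstep, List.foldl_cons]
    exact ih c t (step x pr) (fun q hq => hP q (by simp [hq]))
      (fun p => relB_trans t p x (step x pr) (hrel p)
        (relB_repl' pr.1 pr.2 hOK.2.1 hOK.1 x p))
      (fun q hq => h q (by simp [hq]))

-- ---- the finite overlap tables (checked by the kernel over the 21 pairs)

set_option maxRecDepth 8192 in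
lemma tf1 : ∀ m ∈ List.range fixPairsL.length, ∀ i ∈ List.range m,
    ∀ j ∈ List.range (fixPairsL.getD m ([], [])).1.length, 0 < j →
    (shiftOK (fixPairsL.getD i ([], [])).1 (fixPairsL.getD m ([], [])).1 j = true ∨
     ((fixPairsL.getD m ([], [])).1 ∈ pvTKeys ∧
      j + 1 = (fixPairsL.getD m ([], [])).1.length ∧
      (fixPairsL.getD m ([], [])).1.drop j = ['T'] ∧
      ((fixPairsL.getD i ([], [])).1 = "That'S".toList ∨
       (fixPairsL.getD i ([], [])).1 = "They'Re".toList))) := by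
  decide

lemma tf2 : ∀ q ∈ fixPairsL, ∀ pr ∈ fixPairsL, ∀ j, j < pr.2.length → shiftOK q.1 pr.2 j = true := by
  decide

-- ---- the main equivalence outside the fusion region

lemma infix_of_suffix_infix {f l s : List Char} (h1 : l <:+ s) (h2 : f <:+: l) : f <:+: s :=
  h2.trans h1.isInfix

lemma fcGo_succ_cons (m : Nat) (c : Char) (rest : List Char) :
    fcGo (m + 1) (c :: rest) =
      match fixPairsL.find? (fun p => p.1.isPrefixOf (c :: rest)) with
      | some p => p.2 ++ fcGo m (rest.drop (p.1.length - 1))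
      | none => c :: fcGo m rest := by
  rw [fcGo, fcRules_eq]

lemma main_eq : ∀ (n : Nat) (s : List Char), s.length ≤ n →
    (∀ f ∈ pvFusions, ¬ f <:+: s) → seqL s = fcGo n s := by
  intro n
  induction n with
  | zero =>
    intro s hs _
    have : s = [] := List.length_eq_zero_iff.mp (Nat.le_zero.mp hs)
    subst this
    exact seq_nil _
  | succ m ih =>
    intro s hs hND
    cases s with
    | nil => exact seq_nil _
    | cons c rest =>
      rw [fcGo_succ_cons]
      cases hfind : fixPairsL.find? (fun p => p.1.isPrefixOf (c :: rest)) with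
      | none =>
        have hno : ∀ pr ∈ fixPairsL, ¬ pr.1 <+: (c :: rest) := by
          intro pr hpr hc
          have := List.find?_eq_none.mp hfind pr hpr
          simp [List.isPrefixOf_iff_prefix] at this
          exact this hc
        have hseq : seqL (c :: rest) = c :: seqL rest :=
          seq_noMatch fixPairsL c rest rest pairs_ok (fun p => relB_refl p rest) hno
        rw [hseq, ih rest (by simpa using hs)
          (fun f hf hinf => hND f hf (infix_of_suffix_infix (List.suffix_cons c rest) hinf))]
      | some pr =>
        obtain ⟨hpred, as, bs, heq, hfirst⟩ := List.find?_eq_some_iff_append.mp hfind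
        have hkpre : pr.1 <+: (c :: rest) := List.isPrefixOf_iff_prefix.mp hpred
        obtain ⟨u, hu⟩ := hkpre
        have hprmem : pr ∈ fixPairsL := by rw [heq]; simp
        have hOK := pairs_ok pr hprmem
        have hk0 : pr.1 ≠ [] := hOK.1
        have hlenk : 1 ≤ pr.1.length := by
          cases hk : pr.1 with
          | nil => exact absurd hk hk0
          | cons a b => simp
        have hlens : pr.1.length + u.length = rest.length + 1 := by
          have := congrArg List.length hu; simpa using this
        -- the scan side consumes exactly pr.1
        have hdropu : rest.drop (pr.1.length - 1) = u := by
          have h1 : (c :: rest).drop pr.1.length = u := by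
            rw [← hu]; exact List.drop_left
          obtain ⟨kk, hkk⟩ : ∃ kk, pr.1.length = kk + 1 :=
            ⟨pr.1.length - 1, by omega⟩
          rw [hkk] at h1
          simpa [hkk] using h1
        -- index bookkeeping for the overlap table
        have hmlt : as.length < fixPairsL.length := by rw [heq]; simp
        have hmget : fixPairsL.getD as.length (([], []) : List Char × List Char) = pr := by
          rw [heq, List.getD_append_right as _ (([], []) : List Char × List Char) as.length le_rfl]
          simp
        -- stage 1: the passes before pr walk over the matched pr.1 unchanged
        have hstage1 : ∀ x, (∀ p, relB p u x = true) →
            as.foldl step (pr.1 ++ x) = pr.1 ++ as.foldl step x := by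
          intro x hx
          apply seq_through pr.1 as u x (fun q hq => pairs_ok q (by rw [heq]; simp [hq])) hx
          intro q hq j hj hc
          obtain ⟨i, hi, hiq⟩ := List.mem_iff_getElem.mp hq
          have higet : fixPairsL.getD i (([], []) : List Char × List Char) = q := by
            rw [heq, List.getD_append as _ (([], []) : List Char × List Char) i hi, List.getD_eq_getElem as (([], []) : List Char × List Char) hi, hiq]
          rcases Nat.eq_zero_or_pos j with rfl | hj0
          · -- j = 0: q is an earlier pass and does not match at position 0
            simp only [List.drop_zero] at hc
            rw [hu] at hc
            have hfq := hfirst q (by rw [← hiq]; exact List.getElem_mem hi)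
            rw [List.isPrefixOf_iff_prefix.mpr hc] at hfq
            simp at hfq
          · rcases tf1 as.length (List.mem_range.mpr hmlt) i (List.mem_range.mpr hi) j
              (List.mem_range.mpr (by rwa [hmget])) hj0 with hok | ⟨hkT, _, hdT, hq12⟩
            · rw [higet, hmget] at hok
              exact shiftOK_spec q.1 pr.1 j hok u hc
            · rw [hmget] at hdT hkT
              rw [higet] at hq12
              rw [hdT] at hc
              have hfus : ∀ (suf : List Char), q.1 = 'T' :: suf → pr.1 ++ suf ∈ pvFusions →
                  False := by
                intro suf hsuf hmemf
                rw [hsuf] at hc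
                obtain ⟨w, hw⟩ := (List.cons_prefix_cons.mp hc).2
                have hw' : suf ++ w = u := by simpa using hw
                apply hND (pr.1 ++ suf) hmemf
                refine infix_of_suffix_infix (l := pr.1 ++ u) (by rw [hu]) ?_
                exact List.IsPrefix.isInfix ⟨w, by rw [← hw', List.append_assoc]⟩
              have hmemf : ∀ suf ∈ ["hat'S".toList, "hey'Re".toList], pr.1 ++ suf ∈ pvFusions := by
                intro suf hsuf
                unfold pvFusions
                rw [List.mem_flatMap]
                exact ⟨pr.1, hkT, by fin_cases hsuf <;> simp⟩
              rcases hq12 with h | h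
              · exact hfus "hat'S".toList (by rw [h]; rfl) (hmemf _ (by simp))
              · exact hfus "hey'Re".toList (by rw [h]; rfl) (hmemf _ (by simp))
        -- stage 3: the passes after pr walk over the emitted value pr.2 unchanged
        have hstage3 : ∀ y, bs.foldl step (pr.2 ++ y) = pr.2 ++ bs.foldl step y := by
          intro y
          exact seq_clean bs pr.2 y
            (fun q hq j hj => tf2 q (by rw [heq]; simp [hq]) pr hprmem j hj)
        -- assemble the sequential side
        have hseq : seqL (c :: rest) = pr.2 ++ seqL u := by
          unfold seqL
          rw [heq, List.foldl_append, List.foldl_cons, List.foldl_append, List.foldl_cons]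
          rw [← hu, hstage1 u (fun p => relB_refl p u)]
          rw [show step (pr.1 ++ as.foldl step u) pr = pr.2 ++ repl pr.1 pr.2 (as.foldl step u)
            from repl_append_self pr.1 pr.2 hk0 _]
          rw [hstage3]
          rfl
        rw [hseq]
        show pr.2 ++ seqL u = pr.2 ++ fcGo m (rest.drop (pr.1.length - 1))
        rw [hdropu, ih u (by simp only [List.length_cons] at hs; omega)
          (fun f hf hinf => hND f hf (infix_of_suffix_infix ⟨pr.1, hu⟩ hinf))]

-- ---- bridges between the String-level ports and the list-level programs

lemma go_spec (old nw : List Char) (ho : old ≠ []) : ∀ (fuel : Nat) (l acc : List Char),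
    l.length ≤ fuel → PySem.Chars.replace.go old nw fuel l acc = acc.reverse ++ repl old nw l := by
  intro fuel
  induction fuel with
  | zero =>
    intro l acc hl
    have : l = [] := List.length_eq_zero_iff.mp (Nat.le_zero.mp hl)
    subst this
    rw [PySem.Chars.replace.go]
    simp [repl_nil]
  | succ f ihf =>
    intro l acc hl
    cases l with
    | nil =>
      rw [PySem.Chars.replace.go]
      · simp [repl_nil]
      · omega
    | cons c t =>
      rw [PySem.Chars.replace.go]
      by_cases hp : old.isPrefixOf (c :: t)
      · rw [if_pos hp]
        have hpre : old <+: (c :: t) := List.isPrefixOf_iff_prefix.mp hp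
        obtain ⟨w, hw⟩ := hpre
        obtain ⟨o0, o', rfl⟩ : ∃ o0 o', old = o0 :: o' := by
          cases old with
          | nil => exact absurd rfl ho
          | cons a b => exact ⟨a, b, rfl⟩
        have hlw : o'.length + w.length = t.length := by
          have := congrArg List.length hw; simpa using this
        have hlf : t.length ≤ f := by simpa using hl
        have hdw : (c :: t).drop (o0 :: o').length = w := by
          rw [← hw]; exact List.drop_left
        rw [hdw, ihf w (nw.reverse ++ acc) (by omega)]
        have hrepl : repl (o0 :: o') nw (c :: t) = nw ++ repl (o0 :: o') nw w := by
          rw [← hw, repl_append_self _ _ ho]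
        rw [hrepl]
        simp
      · rw [if_neg hp]
        rw [ihf t (c :: acc) (by simpa using hl)]
        rw [repl_cons_neg old nw c t (fun hc => hp (List.isPrefixOf_iff_prefix.mpr hc))]
        simp

lemma chars_replace_eq_repl (s old nw : List Char) (ho : old ≠ []) :
    PySem.Chars.replace s old nw = repl old nw s := by
  rw [PySem.Chars.replace, if_neg (by simpa [List.isEmpty_iff] using ho)]
  simpa using go_spec old nw ho s.length s [] le_rfl

lemma foldA : ∀ (items : List (String × String)) (txt : String),
    (items.foldl (fun t p => PySem.Str.replace t p.1 p.2) txt).toList =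
      (items.map (fun p => (p.1.toList, p.2.toList))).foldl
        (fun t pr => PySem.Chars.replace t pr.1 pr.2) txt.toList := by
  intro items
  induction items with
  | nil => intro txt; rfl
  | cons it items ih =>
    intro txt
    simp only [List.foldl_cons, List.map_cons]
    rw [ih, PySem.Str.toList_replace]

lemma foldRepl : ∀ (ps : List (List Char × List Char)) (x : List Char),
    (∀ pr ∈ ps, pr.1 ≠ []) →
    ps.foldl (fun t pr => PySem.Chars.replace t pr.1 pr.2) x = ps.foldl step x := by
  intro ps
  induction ps with
  | nil => intro x _; rfl
  | cons pr ps ih =>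
    intro x h
    simp only [List.foldl_cons]
    rw [chars_replace_eq_repl x pr.1 pr.2 (h pr (by simp)), ih _ (fun q hq => h q (by simp [hq]))]
    rfl

lemma portA_toList (text : String) : (fix_contractions text).toList = seqL text.toList := by
  rw [fix_contractions, foldA]
  exact foldRepl fixPairsL text.toList (fun pr hpr => (pairs_ok pr hpr).1)

lemma portB_toList (text : String) : (fix_contractions_alt text).toList = fcScan text.toList := by
  rw [fix_contractions_alt, String.toList_ofList]

-- ===== VERDICT (by name: the statement is the Claim_ definition above) =====
set_option maxRecDepth 40000 in
theorem fix_contractions_spec : Claim_equal_fix_contractions := by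
  intro text _ hpre
  unfold Spec_fix_contractions
  apply String.toList_inj.mp
  rw [portA_toList, portB_toList]
  apply main_eq text.toList.length text.toList le_rfl
  intro f hf hinf
  have hmem : ∀ g ∈ pvFusions, ∃ s ∈ ["Wasn'That'S", "Wasn'They'Re", "Don'That'S", "Don'They'Re", "Can'That'S", "Can'They'Re",
      "Won'That'S", "Won'They'Re", "Isn'That'S", "Isn'They'Re", "Aren'That'S", "Aren'They'Re",
      "Couldn'That'S", "Couldn'They'Re", "Wouldn'That'S", "Wouldn'They'Re", "Shouldn'That'S",
      "Shouldn'They'Re", "Haven'That'S", "Haven'They'Re", "Hasn'That'S", "Hasn'They'Re"], s.toList = g := by decide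
  obtain ⟨s, hs, hst⟩ := hmem f hf
  have := hpre s hs
  rw [← Bool.not_eq_true] at this
  exact this ((PySem.Str.isIn_iff_infix s text).mpr (by rw [hst]; exact hinf))
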